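-- pv_equiv track=rewrite | github.com/Smitvd22/NLP-Lab | Lab4/LanguageModels.py | build_ngram_model
-- ===== SOURCE A (Python) =====
-- from collections import defaultdict, deque
--
-- def build_ngram_model(tokens_list, n):
-- 	"""Build n-gram model from a list of tokens"""
-- 	counts = defaultdict(int)
-- 	vocab = set()
--
-- 	# Convert tokens to list if it's a generator
-- 	if hasattr(tokens_list, '__iter__') and not isinstance(tokens_list, (list, tuple)):
-- 		tokens_list = list(tokens_list)
--
-- 	for token in tokens_list:
-- 		vocab.add(token)
--
-- 	# Generate n-grams
-- 	for i in range(len(tokens_list) - n + 1):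
-- 		ngram = tuple(tokens_list[i:i + n])
-- 		counts[ngram] += 1
--
-- 	return counts, vocab
-- ===== SOURCE B (Python) =====
-- from collections import defaultdict, deque
--
-- def build_ngram_model(tokens_list, n):
--     """Build n-gram model from a list of tokens (one-pass sliding window)."""
--     tokens_list = list(tokens_list)
--     vocab = set(tokens_list)
--     counts = defaultdict(int)
--     window = deque()
--     for token in tokens_list:
--         window.append(token)
--         if len(window) == n:
--             counts[tuple(window)] += 1
--             window.popleft()
--     return counts, vocab
-- ===== Notes on version B (the rewrite author's own statement) =====
-- stated objective: alternative
-- what changed: Replaces the index/slice loop over range(len-n+1) with a single pass over the tokens maintaining a deque sliding window, counting each window the moment it reaches length n. Pre_ excludes non-positive n, a nonsensical n-gram order on which A's empty/negative-slice arithmetic yields degenerate keys (n==0 gives {(): len+1}) while B yields no n-grams; neither value would be specified.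
-- outside the precondition, e.g. on build_ngram_model([], 0): A returns ({(): 1}, set()), B returns ({}, set()); on build_ngram_model(['a'], -1): A returns ({(): 3}, {'a'}), B returns ({}, {'a'})
import Mathlib
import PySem

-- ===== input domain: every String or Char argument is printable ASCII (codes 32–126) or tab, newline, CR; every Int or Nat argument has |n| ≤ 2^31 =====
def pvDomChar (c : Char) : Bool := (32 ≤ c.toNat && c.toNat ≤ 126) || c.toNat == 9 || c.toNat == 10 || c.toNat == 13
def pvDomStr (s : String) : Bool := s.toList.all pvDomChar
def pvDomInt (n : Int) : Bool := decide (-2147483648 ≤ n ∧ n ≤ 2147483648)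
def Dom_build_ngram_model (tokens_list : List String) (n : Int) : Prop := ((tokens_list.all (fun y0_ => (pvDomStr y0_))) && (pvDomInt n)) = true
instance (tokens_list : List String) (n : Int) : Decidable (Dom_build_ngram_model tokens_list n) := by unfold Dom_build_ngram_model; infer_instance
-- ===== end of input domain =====

-- B replaces A's index/slice loop with a one-pass sliding window (deque); Pre_ restricts the
-- claim to n ≥ 1 (for n ≤ 0 A returns degenerate empty-slice counts, B empty counts).

-- ===== PORT A =====
def build_ngram_model (tokens_list : List String) (n : Int) : (List (List String × Int)) × List String :=
  -- vocab: for token in tokens_list: vocab.add(token)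
  let vocab : PySem.Set String := tokens_list.foldl PySem.Set.add PySem.Set.empty
  -- for i in range(len(tokens_list) - n + 1): counts[tuple(tokens_list[i:i+n])] += 1
  let counts : PySem.Dict (List String) Int :=
    (PySem.List.pyRange 0 ((tokens_list.length : Int) - n + 1) 1).foldl
      (fun d i => d.modify (PySem.List.slice tokens_list (some i) (some (i + n))) 0 (· + 1))
      PySem.Dict.empty
  (counts.items, vocab)

-- ===== PORT B =====
-- one loop iteration of Source B: window.append(token); if len(window)==n: counts[tuple(window)]+=1; window.popleft()
def pvAltStep (n : Int) (st : PySem.Dict (List String) Int × List String) (tok : String) :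
    PySem.Dict (List String) Int × List String :=
  let w := st.2 ++ [tok]
  if (w.length : Int) = n then (st.1.modify w 0 (· + 1), w.tail) else (st.1, w)

def build_ngram_model_alt (tokens_list : List String) (n : Int) : (List (List String × Int)) × List String :=
  let vocab : PySem.Set String := PySem.Set.ofList tokens_list
  let st := tokens_list.foldl (pvAltStep n) (PySem.Dict.empty, [])
  (st.1.items, vocab)

-- ===== PRECONDITION & SPEC =====
-- Pre_ excludes non-positive n (a nonsensical n-gram order): there A's slicing loop returns
-- degenerate counts built from empty/negative slices (n==0 gives {(): len+1}) while B returns no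
-- n-grams; neither value would be specified, so the corner is excluded.
def Pre_build_ngram_model (tokens_list : List String) (n : Int) : Prop := 1 ≤ n
instance (tokens_list : List String) (n : Int) : Decidable (Pre_build_ngram_model tokens_list n) := by
  unfold Pre_build_ngram_model; infer_instance

def pvWitness_build_ngram_model : List String × Int := ((["a", "b", "a"] : List String), (2 : Int))

def Spec_build_ngram_model (tokens_list : List String) (n : Int) (out : (List (List String × Int)) × List String) : Prop :=
  out = build_ngram_model_alt tokens_list n
instance (tokens_list : List String) (n : Int) (out : (List (List String × Int)) × List String) : Decidable (Spec_build_ngram_model tokens_list n out) := by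
  unfold Spec_build_ngram_model; infer_instance

-- ===== CLAIM (what is proved, stated in full; the proofs are below) =====
def Claim_equal_build_ngram_model : Prop := ∀ (tokens_list : List String) (n : Int), Dom_build_ngram_model tokens_list n → Pre_build_ngram_model tokens_list n → Spec_build_ngram_model tokens_list n (build_ngram_model tokens_list n)

-- ===== LEMMAS AND PROOFS =====

-- the common counting step: counts[w] += 1
def pvWinStep (d : PySem.Dict (List String) Int) (w : List String) : PySem.Dict (List String) Int :=
  d.modify w 0 (· + 1)

-- all contiguous windows of length N, left to right
def pvWindows (N : Nat) : List String → List (List String)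
  | [] => []
  | x :: xs => if N ≤ xs.length + 1 then (x :: xs).take N :: pvWindows N xs else []

theorem pvWindows_eq_nil {N : Nat} {l : List String} (h : l.length < N) : pvWindows N l = [] := by
  cases l with
  | nil => rfl
  | cons x xs =>
    simp only [pvWindows]
    rw [if_neg (by simp at h; omega)]

theorem pvWindows_cons {N : Nat} {l : List String} (h1 : 1 ≤ N) (hN : N ≤ l.length) :
    pvWindows N l = l.take N :: pvWindows N l.tail := by
  cases l with
  | nil => simp at hN; omega
  | cons x xs =>
    simp only [pvWindows, List.tail_cons]
    rw [if_pos (by simpa using hN)]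

theorem pvRange_map_eq_windows (N : Nat) (h : 1 ≤ N) (l : List String) :
    (List.range (l.length + 1 - N)).map (fun k => (l.drop k).take N) = pvWindows N l := by
  induction l with
  | nil =>
    simp [Nat.sub_eq_zero_of_le h, pvWindows]
  | cons x xs ih =>
    by_cases hc : N ≤ xs.length + 1
    · have hm : (x :: xs).length + 1 - N = (xs.length + 1 - N) + 1 := by simp; omega
      rw [hm, List.range_succ_eq_map, List.map_cons, List.map_map]
      rw [pvWindows_cons h (by simpa using hc), List.tail_cons]
      simp only [List.cons.injEq]
      refine ⟨by simp, ?_⟩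
      rw [← ih]
      apply List.map_congr_left
      intro k _
      simp [Function.comp, List.drop_succ_cons]
    · have hm : (x :: xs).length + 1 - N = 0 := by simp; omega
      rw [hm, pvWindows_eq_nil (show (x :: xs).length < N by simp; omega)]
      simp

theorem pvSlide_fold (n : Int) (N : Nat) (hn : n = (N : Int)) (hN : 1 ≤ N) :
    ∀ (rest w : List String) (d : PySem.Dict (List String) Int), w.length < N →
      (rest.foldl (pvAltStep n) (d, w)).1 = (pvWindows N (w ++ rest)).foldl pvWinStep d := by
  intro rest
  induction rest with
  | nil =>
    intro w d hw
    simp [pvWindows_eq_nil (by simpa using hw)]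
  | cons t r ih =>
    intro w d hw
    rw [List.foldl_cons]
    by_cases hc : (((w ++ [t]).length : Int)) = n
    · have hlen : (w ++ [t]).length = N := by rw [hn] at hc; exact_mod_cast hc
      have htl : ((w ++ [t]).tail).length < N := by
        simp only [List.length_tail, hlen]; omega
      have hstep : pvAltStep n (d, w) t = (pvWinStep d (w ++ [t]), (w ++ [t]).tail) := by
        simp only [pvAltStep, pvWinStep]
        rw [if_pos hc]
      rw [hstep, ih _ _ htl]
      rw [show w ++ t :: r = (w ++ [t]) ++ r from by simp]
      have hge : N ≤ ((w ++ [t]) ++ r).length := by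
        rw [List.length_append, hlen]; omega
      conv_rhs => rw [pvWindows_cons hN hge]
      rw [List.foldl_cons]
      have htake : ((w ++ [t]) ++ r).take N = w ++ [t] := by
        rw [← hlen]
        simp [List.take_append]
      have htail : ((w ++ [t]) ++ r).tail = (w ++ [t]).tail ++ r := by
        cases w <;> simp
      rw [htake, htail]
    · have hlt : (w ++ [t]).length < N := by
        simp only [List.length_append, List.length_cons, List.length_nil] at hc ⊢
        omega
      have hstep : pvAltStep n (d, w) t = (d, w ++ [t]) := by
        simp only [pvAltStep]
        rw [if_neg hc]
      rw [hstep, ih _ _ hlt]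
      rw [show w ++ t :: r = (w ++ [t]) ++ r from by simp]

-- ===== VERDICT (by name: the statement is the Claim_ definition above) =====
theorem build_ngram_model_spec : Claim_equal_build_ngram_model := by
  intro tokens_list n _ hpre
  have hpos : 1 ≤ n := hpre
  set N := n.toNat with hNdef
  have hn : n = (N : Int) := by omega
  have hN : 1 ≤ N := by omega
  show build_ngram_model tokens_list n = build_ngram_model_alt tokens_list n
  simp only [build_ngram_model, build_ngram_model_alt]
  have hB := pvSlide_fold n N hn hN tokens_list [] PySem.Dict.empty (by simpa using hN)
  simp only [List.nil_append] at hB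
  rw [hB]
  have hA : (PySem.List.pyRange 0 ((tokens_list.length : Int) - n + 1) 1).foldl
      (fun d i => d.modify (PySem.List.slice tokens_list (some i) (some (i + n))) 0 (· + 1))
      PySem.Dict.empty
      = (pvWindows N tokens_list).foldl pvWinStep PySem.Dict.empty := by
    rw [PySem.List.pyRange_one, List.foldl_map]
    rw [show (((tokens_list.length : Int) - n + 1) - 0).toNat = tokens_list.length + 1 - N from by omega]
    rw [← pvRange_map_eq_windows N hN, List.foldl_map]
    simp only [pvWinStep, zero_add, hn, PySem.List.slice_natCast_add]
  rw [hA]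
  rw [PySem.Set.ofList_eq_foldl]
  rfl
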